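-- pv_equiv track=rewrite | github.com/MolCrafts/molpy | src/molpy/io/data/lammps_molecule.py | _get_section_name
-- ===== SOURCE A (Python) =====
-- def _get_section_name(line: str) -> str | None:
--     """Get section name if line is a section header."""
--     line_lower = line.lower().strip()
--
--     section_mapping = {
--         "coords": "Coords",
--         "types": "Types",
--         "molecules": "Molecules",
--         "fragments": "Fragments",
--         "charges": "Charges",
--         "diameters": "Diameters",
--         "dipoles": "Dipoles",
--         "masses": "Masses",
--         "bonds": "Bonds",
--         "angles": "Angles",
--         "dihedrals": "Dihedrals",
--         "impropers": "Impropers",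
--         "special bond counts": "Special Bond Counts",
--         "special bonds": "Special Bonds",
--         "shake flags": "Shake Flags",
--         "shake atoms": "Shake Atoms",
--         "shake bond types": "Shake Bond Types",
--         "body integers": "Body Integers",
--         "body doubles": "Body Doubles",
--     }
--
--     for key, value in section_mapping.items():
--         if line_lower == key:
--             return value
--
--     return None
-- ===== SOURCE B (Python) =====
-- _SECTIONS = frozenset({
--     "coords", "types", "molecules", "fragments", "charges", "diameters",
--     "dipoles", "masses", "bonds", "angles", "dihedrals", "impropers",
--     "special bond counts", "special bonds", "shake flags", "shake atoms",
--     "shake bond types", "body integers", "body doubles",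
-- })
--
--
-- def _get_section_name(line: str) -> str | None:
--     """Get section name if line is a section header."""
--     line_lower = line.lower().strip()
--     return line_lower.title() if line_lower in _SECTIONS else None
-- ===== Notes on version B (the rewrite author's own statement) =====
-- stated objective: simpler
-- what changed: Replaces the 19-entry lookup table and its linear key scan with a frozenset membership test plus the closed-form string transformation str.title(), which reproduces every canonical section name from its lowercased key.
import Mathlib
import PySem

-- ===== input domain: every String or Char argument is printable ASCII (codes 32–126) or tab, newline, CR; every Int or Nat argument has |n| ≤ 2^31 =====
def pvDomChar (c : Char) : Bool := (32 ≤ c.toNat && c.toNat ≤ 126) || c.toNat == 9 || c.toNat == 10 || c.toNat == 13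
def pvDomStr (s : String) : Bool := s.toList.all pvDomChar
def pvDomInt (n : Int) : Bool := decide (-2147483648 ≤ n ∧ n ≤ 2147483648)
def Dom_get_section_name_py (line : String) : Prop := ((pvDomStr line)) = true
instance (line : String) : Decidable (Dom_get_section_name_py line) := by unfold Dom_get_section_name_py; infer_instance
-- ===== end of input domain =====

-- B replaces A's 19-entry dict scan with a frozenset membership test plus str.title() (simpler; same behaviour).


-- ===== PORT A =====
-- the dict literal of A, in insertion order (keys/values as List Char)
def pvSectionMapping : List (List Char × List Char) :=
  [("coords".toList, "Coords".toList),
   ("types".toList, "Types".toList),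
   ("molecules".toList, "Molecules".toList),
   ("fragments".toList, "Fragments".toList),
   ("charges".toList, "Charges".toList),
   ("diameters".toList, "Diameters".toList),
   ("dipoles".toList, "Dipoles".toList),
   ("masses".toList, "Masses".toList),
   ("bonds".toList, "Bonds".toList),
   ("angles".toList, "Angles".toList),
   ("dihedrals".toList, "Dihedrals".toList),
   ("impropers".toList, "Impropers".toList),
   ("special bond counts".toList, "Special Bond Counts".toList),
   ("special bonds".toList, "Special Bonds".toList),
   ("shake flags".toList, "Shake Flags".toList),
   ("shake atoms".toList, "Shake Atoms".toList),
   ("shake bond types".toList, "Shake Bond Types".toList),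
   ("body integers".toList, "Body Integers".toList),
   ("body doubles".toList, "Body Doubles".toList)]

-- the loop 'for key, value in section_mapping.items(): if line_lower == key: return value'
def pvScan (lineLower : List Char) : List (List Char × List Char) → Option String
  | [] => none
  | (k, v) :: rest => if lineLower == k then some (String.ofList v) else pvScan lineLower rest

def get_section_name_py (line : String) : Option String :=
  let lineLower := PySem.Chars.strip (PySem.Chars.lower line.toList)
  pvScan lineLower pvSectionMapping

-- ===== PORT B =====
-- the frozenset of valid lowercased section names
def pvSections : PySem.Set (List Char) :=
  PySem.Set.ofList
    ["coords".toList, "types".toList, "molecules".toList, "fragments".toList,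
     "charges".toList, "diameters".toList, "dipoles".toList, "masses".toList,
     "bonds".toList, "angles".toList, "dihedrals".toList, "impropers".toList,
     "special bond counts".toList, "special bonds".toList, "shake flags".toList,
     "shake atoms".toList, "shake bond types".toList, "body integers".toList,
     "body doubles".toList]

-- str.title(), exact on the printable-ASCII domain (ASCII cased characters are exactly the letters):
-- a letter is uppercased iff the previous character is not a letter, otherwise lowercased
def pvTitle (prevAlpha : Bool) : List Char → List Char
  | [] => []
  | c :: rest =>
    (if PySem.Chars.isalpha c then
       (if prevAlpha then PySem.Chars.lowerChar c else PySem.Chars.upperChar c)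
     else c) :: pvTitle (PySem.Chars.isalpha c) rest

def get_section_name_py_alt (line : String) : Option String :=
  let lineLower := PySem.Chars.strip (PySem.Chars.lower line.toList)
  if pvSections.contains lineLower then some (String.ofList (pvTitle false lineLower)) else none

-- ===== PRECONDITION & SPEC =====
def Spec_get_section_name_py (line : String) (out : Option String) : Prop := out = get_section_name_py_alt line
instance (line : String) (out : Option String) : Decidable (Spec_get_section_name_py line out) := by unfold Spec_get_section_name_py; infer_instance

-- ===== CLAIM (what is proved, stated in full; the proofs are below) =====
def Claim_equal_get_section_name_py : Prop := ∀ (line : String), Dom_get_section_name_py line → Spec_get_section_name_py line (get_section_name_py line)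

-- ===== LEMMAS AND PROOFS =====

-- every key of A's mapping is in B's set
theorem pv_keys_contained : ∀ p ∈ pvSectionMapping, pvSections.contains p.1 = true := by decide

-- if cs matches no key of the pair list, the scan returns none
theorem pvScan_eq_none (cs : List Char) (ps : List (List Char × List Char))
    (h : ∀ p ∈ ps, cs ≠ p.1) : pvScan cs ps = none := by
  induction ps with
  | nil => rfl
  | cons p rest ih =>
    simp only [pvScan]
    rw [if_neg, ih]
    · intro q hq; exact h q (List.mem_cons_of_mem _ hq)
    · simpa using h p (List.mem_cons_self ..)

-- both sides are the same function of line_lower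
theorem pv_core (cs : List Char) :
    pvScan cs pvSectionMapping =
      (if pvSections.contains cs then some (String.ofList (pvTitle false cs)) else none) := by
  by_cases h : pvSections.contains cs = true
  · rw [if_pos h]
    have hmem : cs ∈ pvSections := by simpa using h
    simp only [pvSections, PySem.Set.mem_ofList] at hmem
    fin_cases hmem <;> decide
  · rw [if_neg h]
    apply pvScan_eq_none
    intro p hp hcs
    exact h (hcs ▸ pv_keys_contained p hp)

-- ===== VERDICT (by name: the statement is the Claim_ definition above) =====
theorem get_section_name_py_spec : Claim_equal_get_section_name_py := by
  intro line _
  unfold Spec_get_section_name_py get_section_name_py get_section_name_py_alt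
  exact pv_core _
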